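-- pv_equiv track=rewrite | github.com/uddamchea/aads-class | src/exercises/hashing/hashing.py | hash_folding
-- ===== SOURCE A (Python) =====
-- def hash_folding(key: str, size: int) -> int:
--     """Find hash using folding method"""
--     keyStr = str(key)
--     # removes non digit
--     cleanKey = ''.join(c for c in keyStr if c.isdigit()) #returns a str
--     n = 2
--     splitKey = [cleanKey[i:i+n] for i in range(0, len(cleanKey), n)]
--
--     for x in range(0, len(splitKey)):
--         splitKey[x] = int(splitKey[x])
--     totalKeySum = sum(splitKey)
--     hashFolding = totalKeySum % size
--
--     return hashFolding
-- ===== SOURCE B (Python) =====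
-- def hash_folding(key: str, size: int) -> int:
--     """Find hash using folding method: single streaming pass, no chunk list."""
--     total = 0
--     pending = None  # tens digit of the current (not yet completed) pair
--     for c in str(key):
--         if c.isdigit():
--             d = ord(c) - 48
--             if pending is None:
--                 pending = d
--             else:
--                 total += pending * 10 + d
--                 pending = None
--     if pending is not None:
--         total += pending
--     return total % size
-- ===== Notes on version B (the rewrite author's own statement) =====
-- stated objective: alternative
-- what changed: B replaces A's four sequential passes (filter to a clean string, build a list of 2-char slices via range, in-place int() conversion loop, sum) by one streaming pass over the key that maintains a running total and a pending tens digit, flushing a trailing lone digit after the loop.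
import Mathlib
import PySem

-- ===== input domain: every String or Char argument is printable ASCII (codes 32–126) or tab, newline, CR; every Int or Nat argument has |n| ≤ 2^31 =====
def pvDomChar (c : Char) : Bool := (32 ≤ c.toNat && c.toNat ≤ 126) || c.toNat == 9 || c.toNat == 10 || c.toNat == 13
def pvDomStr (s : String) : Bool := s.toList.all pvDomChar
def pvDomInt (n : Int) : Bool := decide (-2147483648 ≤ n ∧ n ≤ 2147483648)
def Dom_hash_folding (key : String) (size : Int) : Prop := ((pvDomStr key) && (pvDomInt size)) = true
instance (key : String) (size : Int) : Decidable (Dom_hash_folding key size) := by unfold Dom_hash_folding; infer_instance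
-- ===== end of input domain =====

-- B is a single streaming pass (running total + pending tens digit) replacing A's
-- filter / slice-list / convert / sum pipeline; same return value on size ≠ 0.

-- ===== PORT A =====
def hash_folding (key : String) (size : Int) : Int :=
  let keyStr := key.toList
  let cleanKey := keyStr.filter (fun c => PySem.Chars.isdigit c)
  let splitKey := (PySem.List.pyRange 0 (cleanKey.length : Int) 2).map
      (fun i => PySem.List.slice cleanKey (some i) (some (i + 2)))
  let splitKeyInt := splitKey.map (fun chunk => (PySem.Int.ofChars? chunk).getD 0)
  let totalKeySum := splitKeyInt.foldl (· + ·) 0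
  PySem.Int.mod totalKeySum size

-- ===== PORT B =====
def hfStep (st : Int × Option Int) (c : Char) : Int × Option Int :=
  if PySem.Chars.isdigit c then
    let d : Int := (c.toNat : Int) - 48
    match st.2 with
    | none => (st.1, some d)
    | some p => (st.1 + p * 10 + d, none)
  else st

def hash_folding_alt (key : String) (size : Int) : Int :=
  let st := key.toList.foldl hfStep (0, none)
  let total := match st.2 with
    | none => st.1
    | some p => st.1 + p
  PySem.Int.mod total size

-- ===== PRECONDITION & SPEC =====
-- Pre_ excludes only size = 0, where Python's '% size' raises ZeroDivisionError (in A and in B).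
def Pre_hash_folding (_key : String) (size : Int) : Prop := size ≠ 0
instance (key : String) (size : Int) : Decidable (Pre_hash_folding key size) := by
  unfold Pre_hash_folding; infer_instance
def pvWitness_hash_folding : String × Int := ("abc1234x5", 7)

def Spec_hash_folding (key : String) (size : Int) (out : Int) : Prop := out = hash_folding_alt key size
instance (key : String) (size : Int) (out : Int) : Decidable (Spec_hash_folding key size out) := by unfold Spec_hash_folding; infer_instance

-- ===== CLAIM (what is proved, stated in full; the proofs are below) =====
def Claim_equal_hash_folding : Prop := ∀ (key : String) (size : Int), Dom_hash_folding key size → Pre_hash_folding key size → Spec_hash_folding key size (hash_folding key size)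

-- ===== LEMMAS AND PROOFS =====

-- digit value of a char
def dval (c : Char) : Int := (c.toNat : Int) - 48

-- sum of digit pairs, folding two digits at a time (the common value of both ports)
def pairSum : List Char → Int
  | [] => 0
  | [a] => dval a
  | a :: b :: t => (dval a * 10 + dval b) + pairSum t

lemma digit_mem (a : Char) (h : PySem.Chars.isdigit a = true) :
    a ∈ (['0','1','2','3','4','5','6','7','8','9'] : List Char) := by
  simp [PySem.Chars.isdigit, Char.le_def] at h
  obtain ⟨h1, h2⟩ := h
  have hlo : 48 ≤ a.val.toNat := h1
  have hhi : a.val.toNat ≤ 57 := h2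
  interval_cases hv : a.val.toNat <;>
    simp [Char.ext_iff, ← UInt32.toNat_inj, hv]

lemma ofChars_pair (a b : Char) (ha : PySem.Chars.isdigit a = true)
    (hb : PySem.Chars.isdigit b = true) :
    PySem.Int.ofChars? [a, b] = some (dval a * 10 + dval b) := by
  have Ha := digit_mem a ha
  have Hb := digit_mem b hb
  fin_cases Ha <;> fin_cases Hb <;> decide

lemma ofChars_single (a : Char) (ha : PySem.Chars.isdigit a = true) :
    PySem.Int.ofChars? [a] = some (dval a) := by
  have Ha := digit_mem a ha
  fin_cases Ha <;> decide

lemma foldl_add_shift (l : List Int) (s : Int) :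
    l.foldl (· + ·) s = s + l.foldl (· + ·) 0 := by
  induction l generalizing s with
  | nil => simp
  | cons x t ih => simp [List.foldl_cons, ih (s + x), ih x]; ring

-- the value of one chunk of A
def chunkVal (ds : List Char) (k : Nat) : Int :=
  (PySem.Int.ofChars? ((ds.drop (2 * k)).take 2)).getD 0

lemma range2 (n : Nat) :
    PySem.List.pyRange 0 (n : Int) 2 =
      (List.range ((n + 1) / 2)).map (fun k => ((2 * k : Nat) : Int)) := by
  rw [PySem.List.pyRange_of_pos _ _ (by norm_num)]
  rcases Nat.eq_zero_or_pos n with h | h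
  · simp [h]
  · have hlt : (0 : Int) < (n : Int) := by exact_mod_cast h
    simp only [if_pos hlt]
    have h1 : ((n : Int) - 0 + 2 - 1) = ((n + 1 : Nat) : Int) := by push_cast; ring
    have h2 : (((n + 1 : Nat) : Int) / 2).toNat = (n + 1) / 2 := by omega
    rw [h1, h2]
    apply List.map_congr_left
    intro k _
    push_cast; ring

lemma slice_chunk (ds : List Char) (k : Nat) :
    PySem.List.slice ds (some ((2 * k : Nat) : Int)) (some (((2 * k : Nat) : Int) + 2)) =
      (ds.drop (2 * k)).take 2 := by
  have h2 : (((2 * k : Nat) : Int) + 2) = ((2 * k + 2 : Nat) : Int) := by push_cast; ring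
  rw [h2, PySem.List.slice_natCast]
  congr 1
  omega

lemma A_sum (ds : List Char) (h : ∀ c ∈ ds, PySem.Chars.isdigit c = true) :
    ((List.range ((ds.length + 1) / 2)).map (chunkVal ds)).foldl (· + ·) 0 = pairSum ds := by
  induction ds using pairSum.induct with
  | case1 => simp [pairSum]
  | case2 a =>
      simp [pairSum, List.range_succ, chunkVal,
        ofChars_single a (h a (by simp))]
  | case3 a b t ih =>
      have hm : ((a :: b :: t).length + 1) / 2 = (t.length + 1) / 2 + 1 := by
        simp [List.length_cons]; omega
      rw [hm, List.range_succ_eq_map, List.map_cons, List.foldl_cons, List.map_map]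
      have hc0 : chunkVal (a :: b :: t) 0 = dval a * 10 + dval b := by
        simp [chunkVal, ofChars_pair a b (h a (by simp)) (h b (by simp))]
      have hcs : (List.range ((t.length + 1) / 2)).map (chunkVal (a :: b :: t) ∘ Nat.succ)
          = (List.range ((t.length + 1) / 2)).map (chunkVal t) := by
        apply List.map_congr_left
        intro k _
        simp only [Function.comp, chunkVal]
        have : 2 * Nat.succ k = 2 * k + 1 + 1 := by omega
        rw [this, List.drop_succ_cons, List.drop_succ_cons]
      rw [hcs, foldl_add_shift]
      rw [ih (fun c hc => h c (by simp [hc]))]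
      simp [pairSum, hc0]

-- the finishing step of B: flush the pending digit
def hfFinish (st : Int × Option Int) : Int :=
  match st.2 with
  | none => st.1
  | some p => st.1 + p

lemma B_skip (l : List Char) (st : Int × Option Int) :
    l.foldl hfStep st = (l.filter (fun c => PySem.Chars.isdigit c)).foldl hfStep st := by
  induction l generalizing st with
  | nil => rfl
  | cons c t ih =>
      by_cases hc : PySem.Chars.isdigit c = true
      · simp [hc, List.foldl_cons, ih]
      · simp [hc, List.foldl_cons, ih, hfStep]

lemma B_pairs (ds : List Char) (h : ∀ c ∈ ds, PySem.Chars.isdigit c = true) :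
    ∀ s : Int, hfFinish (ds.foldl hfStep (s, none)) = s + pairSum ds := by
  induction ds using pairSum.induct with
  | case1 => intro s; simp [hfFinish, pairSum]
  | case2 a =>
      intro s
      simp [hfStep, h a (by simp), hfFinish, pairSum, dval]
  | case3 a b t ih =>
      intro s
      have ha := h a (by simp)
      have hb := h b (by simp)
      simp only [List.foldl_cons, hfStep, ha, hb, if_pos]
      rw [ih (fun c hc => h c (by simp [hc])) (s + ((a.toNat : Int) - 48) * 10 + ((b.toNat : Int) - 48))]
      simp [pairSum, dval]; ring

lemma comp_chunk (ds : List Char) :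
    (((fun chunk => (PySem.Int.ofChars? chunk).getD 0) ∘
      (fun i => PySem.List.slice ds (some i) (some (i + 2)))) ∘ (fun k : Nat => ((2 * k : Nat) : Int)))
      = chunkVal ds := by
  funext k
  show (PySem.Int.ofChars? (PySem.List.slice ds (some ((2 * k : Nat) : Int))
      (some (((2 * k : Nat) : Int) + 2)))).getD 0 = chunkVal ds k
  rw [slice_chunk]
  rfl

lemma ports_eq (key : String) (size : Int) :
    hash_folding key size = hash_folding_alt key size := by
  have hall : ∀ c ∈ key.toList.filter (fun c => PySem.Chars.isdigit c),
      PySem.Chars.isdigit c = true := fun c hc => List.of_mem_filter hc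
  have hA : List.foldl (· + ·) 0
      (List.map (fun chunk => (PySem.Int.ofChars? chunk).getD 0)
        (List.map (fun i => PySem.List.slice (key.toList.filter (fun c => PySem.Chars.isdigit c)) (some i) (some (i + 2)))
          (PySem.List.pyRange 0 (((key.toList.filter (fun c => PySem.Chars.isdigit c)).length : Nat) : Int) 2)))
      = pairSum (key.toList.filter (fun c => PySem.Chars.isdigit c)) := by
    rw [range2, List.map_map, List.map_map, comp_chunk]
    exact A_sum _ hall
  have hB : hfFinish (key.toList.foldl hfStep (0, none))
      = pairSum (key.toList.filter (fun c => PySem.Chars.isdigit c)) := by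
    rw [B_skip]
    rw [B_pairs _ hall 0]
    ring
  calc hash_folding key size
      = PySem.Int.mod (pairSum (key.toList.filter (fun c => PySem.Chars.isdigit c))) size :=
        congrArg (fun t => PySem.Int.mod t size) hA
    _ = hash_folding_alt key size :=
        (congrArg (fun t => PySem.Int.mod t size) hB).symm

-- ===== VERDICT (by name: the statement is the Claim_ definition above) =====
theorem hash_folding_spec : Claim_equal_hash_folding := by
  intro key size _ _
  unfold Spec_hash_folding
  exact ports_eq key size
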